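-- pv_equiv track=rewrite | github.com/ArthurCPeng/letterpress-bot | letterpress-bot.py | letter_sort
-- ===== SOURCE A (Python) =====
-- def letter_sort(word_list):
--     max_length = 0
--     word_list_sorted = []
--     for word in word_list:
--         if len(word) > max_length:
--             max_length = len(word)
--     for i in range(max_length):
--         for word in word_list:
--             if len(word) >= max_length - i:
--                 word_list_sorted.append(word)
--     return word_list_sorted
-- ===== SOURCE B (Python) =====
-- def letter_sort(word_list):
--     max_length = max((len(w) for w in word_list), default=0)
--     # buckets[t] holds, in input order, the words of length > t (threshold t+1)
--     buckets = [[] for _ in range(max_length)]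
--     for word in word_list:
--         for t in range(len(word)):
--             buckets[t].append(word)
--     out = []
--     for bucket in reversed(buckets):
--         out += bucket
--     return out
-- ===== Notes on version B (the rewrite author's own statement) =====
-- stated objective: alternative
-- what changed: Instead of rescanning the whole list once per length threshold (max_length nested passes), B makes one bucket-filling pass that drops each word into the buckets for thresholds 1..len(word) and then concatenates the buckets from the highest threshold down; it trades the rescans for O(sum of word lengths) bucket appends.
import Mathlib
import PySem

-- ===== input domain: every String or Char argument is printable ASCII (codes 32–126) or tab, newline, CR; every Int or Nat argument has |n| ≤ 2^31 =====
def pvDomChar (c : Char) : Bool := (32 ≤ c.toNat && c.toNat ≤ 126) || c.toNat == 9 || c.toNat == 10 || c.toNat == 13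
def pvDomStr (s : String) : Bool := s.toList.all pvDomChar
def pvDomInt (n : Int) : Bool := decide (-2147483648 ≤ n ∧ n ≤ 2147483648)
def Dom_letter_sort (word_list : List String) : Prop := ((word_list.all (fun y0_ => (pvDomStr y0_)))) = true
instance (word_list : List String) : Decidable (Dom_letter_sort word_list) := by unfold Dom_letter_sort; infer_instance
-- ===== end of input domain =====

-- B replaces A's max_length rescans of the whole list with one bucket-filling pass, then
-- concatenates the buckets from the highest length threshold down (objective: alternative).

-- len(word): number of characters (Python len counts code points; exact on all strings)
def pvLen (w : String) : Nat := w.toList.length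

-- ===== PORT A =====
-- All Python ints here (lengths, max_length, loop index i) are nonnegative and i < max_length
-- inside the loop, so Nat arithmetic (including max_length - i) is exact.
def letter_sort (word_list : List String) : List String :=
  let max_length := word_list.foldl (fun m w => if pvLen w > m then pvLen w else m) 0
  (List.range max_length).foldl
    (fun acc i =>
      word_list.foldl (fun acc2 w => if pvLen w ≥ max_length - i then acc2 ++ [w] else acc2) acc)
    []

-- ===== PORT B =====
def bucketStep (bs : List (List String)) (w : String) : List (List String) :=
  (List.range (pvLen w)).foldl (fun b t => b.modify t (fun x => x ++ [w])) bs

def letter_sort_alt (word_list : List String) : List String :=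
  let max_length := word_list.foldl (fun m w => max m (pvLen w)) 0
  let buckets := word_list.foldl bucketStep (List.replicate max_length ([] : List String))
  buckets.reverse.foldl (fun out b => out ++ b) []

-- ===== PRECONDITION & SPEC =====
def Spec_letter_sort (word_list : List String) (out : List String) : Prop := out = letter_sort_alt word_list
instance (word_list : List String) (out : List String) : Decidable (Spec_letter_sort word_list out) := by unfold Spec_letter_sort; infer_instance

-- ===== CLAIM (what is proved, stated in full; the proofs are below) =====
def Claim_equal_letter_sort : Prop := ∀ (word_list : List String), Dom_letter_sort word_list → Spec_letter_sort word_list (letter_sort word_list)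

-- ===== LEMMAS AND PROOFS =====

-- the two max_length computations agree
lemma max_fold_eq (wl : List String) (a : Nat) :
    wl.foldl (fun m w => if pvLen w > m then pvLen w else m) a
      = wl.foldl (fun m w => max m (pvLen w)) a := by
  induction wl generalizing a with
  | nil => rfl
  | cons w ws ih =>
    simp only [List.foldl_cons]
    rw [ih]
    congr 1
    rcases Nat.lt_or_ge a (pvLen w) with h | h
    · simp [h, Nat.max_eq_right (Nat.le_of_lt h)]
    · simp [Nat.not_lt.mpr h, Nat.max_eq_left h]

-- A's inner loop is "append the filtered list"
lemma foldl_append_if_filter (p : String → Prop) [DecidablePred p]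
    (wl : List String) (acc : List String) :
    wl.foldl (fun a w => if p w then a ++ [w] else a) acc
      = acc ++ wl.filter (fun w => decide (p w)) := by
  induction wl generalizing acc with
  | nil => simp
  | cons w ws ih =>
    by_cases h : p w <;> simp [List.filter_cons, h, ih, List.append_assoc]

-- folding "append g x" is flatMap
lemma foldl_append_flatMap {α β : Type} (g : α → List β) (l : List α) (acc : List β) :
    l.foldl (fun a x => a ++ g x) acc = acc ++ l.flatMap g := by
  induction l generalizing acc with
  | nil => simp
  | cons x xs ih => simp [ih, List.append_assoc]

-- the modify-over-range loop, seen through getElem?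
lemma foldl_modify_range {α : Type} (f : α → α) (n : Nat) (bs : List α) (j : Nat) :
    ((List.range n).foldl (fun b t => b.modify t f) bs)[j]? =
      if j < n then (bs[j]?).map f else bs[j]? := by
  induction n generalizing bs with
  | zero => simp
  | succ n ih =>
    rw [List.range_succ, List.foldl_append]
    simp only [List.foldl_cons, List.foldl_nil]
    rw [List.getElem?_modify, ih]
    rcases Nat.lt_trichotomy j n with h | h | h
    · have hs : j < n + 1 := Nat.lt_succ_of_lt h
      simp only [if_pos h, if_pos hs]
      cases bs[j]? <;> simp [Nat.ne_of_gt h]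
    · subst h
      simp only [Nat.lt_irrefl, if_neg, Nat.lt_succ_self, if_pos, ite_false]
      cases bs[j]? <;> simp
    · have h1 : ¬ j < n := Nat.not_lt.mpr (Nat.le_of_lt h)
      have h2 : ¬ j < n + 1 := Nat.not_lt.mpr h
      have hne : n ≠ j := Nat.ne_of_lt h
      simp only [if_neg h1, if_neg h2]
      cases bs[j]? <;> simp [hne]

-- the bucket-filling pass, seen through getElem?
lemma buckets_getElem (wl : List String) (bs : List (List String)) (j : Nat) :
    (wl.foldl bucketStep bs)[j]? =
      (bs[j]?).map (fun b => b ++ wl.filter (fun w => decide (j < pvLen w))) := by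
  induction wl generalizing bs with
  | nil =>
    simp only [List.foldl_nil, List.filter_nil, List.append_nil]
    cases bs[j]? <;> rfl
  | cons w ws ih =>
    rw [List.foldl_cons, ih]
    have hstep : (bucketStep bs w)[j]? =
        if j < pvLen w then (bs[j]?).map (fun x => x ++ [w]) else bs[j]? :=
      foldl_modify_range _ _ bs j
    rw [hstep]
    by_cases h : j < pvLen w
    · simp only [if_pos h]
      cases bs[j]? <;> simp [List.filter_cons, h, List.append_assoc]
    · simp only [if_neg h]
      cases bs[j]? <;> simp [List.filter_cons, h]

-- the finished buckets, as a map over the thresholds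
lemma buckets_eq (wl : List String) (M : Nat) :
    wl.foldl bucketStep (List.replicate M ([] : List String))
      = (List.range M).map (fun t => wl.filter (fun w => decide (t < pvLen w))) := by
  apply List.ext_getElem?
  intro j
  rw [buckets_getElem]
  by_cases h : j < M
  · simp [List.getElem?_replicate, h]
  · have h' : M ≤ j := Nat.not_lt.mp h
    simp [List.getElem?_replicate, h, List.getElem?_eq_none, h']

-- reversing range M is the map i ↦ M - 1 - i
lemma reverse_range_eq (M : Nat) :
    (List.range M).reverse = (List.range M).map (fun i => M - 1 - i) := by
  apply List.ext_getElem
  · simp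
  · intro i h1 h2
    simp only [List.getElem_reverse, List.getElem_map, List.getElem_range, List.length_range]

theorem letter_sort_spec : Claim_equal_letter_sort := by
  intro wl _
  unfold Spec_letter_sort letter_sort letter_sort_alt
  simp only [max_fold_eq]
  set M := wl.foldl (fun m w => max m (pvLen w)) 0 with hM
  -- A side: flatMap over i = 0..M-1 of the filter at threshold M - i
  have hA : (List.range M).foldl
      (fun acc i => wl.foldl (fun a w => if pvLen w ≥ M - i then a ++ [w] else a) acc) []
      = (List.range M).flatMap (fun i => wl.filter (fun w => decide (M - i ≤ pvLen w))) := by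
    have hfun : (fun acc i => wl.foldl (fun a w => if pvLen w ≥ M - i then a ++ [w] else a) acc)
        = fun acc i => acc ++ wl.filter (fun w => decide (M - i ≤ pvLen w)) := by
      funext acc i
      exact foldl_append_if_filter (fun w => M - i ≤ pvLen w) wl acc
    rw [hfun, foldl_append_flatMap, List.nil_append]
  -- B side: flatten the reversed buckets
  have hB : (wl.foldl bucketStep (List.replicate M ([] : List String))).reverse.foldl
      (fun out b => out ++ b) []
      = (List.range M).flatMap (fun i => wl.filter (fun w => decide (M - 1 - i < pvLen w))) := by
    rw [buckets_eq, ← List.map_reverse, reverse_range_eq, List.map_map]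
    have h1 := foldl_append_flatMap (fun b : List String => b)
      (((List.range M).map (fun i => M - 1 - i)).map
        (fun t => wl.filter (fun w => decide (t < pvLen w)))) []
    simp only [List.nil_append, List.map_map] at h1
    rw [h1, List.flatMap_map]
    simp [Function.comp]
  rw [hA, hB]
  apply List.flatMap_congr
  intro i hi
  apply List.filter_congr
  intro w _
  have hiM : i < M := List.mem_range.mp hi
  have : (M - i ≤ pvLen w) ↔ (M - 1 - i < pvLen w) := by omega
  simp [this]
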